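-- pv_equiv track=rewrite | github.com/krukas/Trionyx | trionyx/trionyx/forms/layout.py | convert_python_to_django_template
-- ===== SOURCE A (Python) =====
-- def convert_python_to_django_template(format):
--     mapping = {
--         '%d': 'd',  # Day of the month, 2 digits with leading zeros.
--         '%m': 'm',  # Month, 2 digits with leading zeros.
--         '%y': 'y',  # Year, 2 digits.
--         '%Y': 'Y',  # Year, 4 digits.
--         '%H': 'H',  # Hour, 24-hour format.
--         '%M': 'i',  # Minutes
--         '%S': 's',  # Seconds, 2 digits with leading zeros.
--         '%p': 'A',  # 'AM' or 'PM'
--     }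
--
--     for p_format, m_format in mapping.items():
--         format = format.replace(p_format, m_format)
--
--     return format
-- ===== SOURCE B (Python) =====
-- def convert_python_to_django_template(format):
--     mapping = {'d': 'd', 'm': 'm', 'y': 'y', 'Y': 'Y', 'H': 'H', 'M': 'i', 'S': 's', 'p': 'A'}
--     out = []
--     i = 0
--     n = len(format)
--     while i < n:
--         if format[i] == '%' and i + 1 < n and format[i + 1] in mapping:
--             out.append(mapping[format[i + 1]])
--             i += 2
--         else:
--             out.append(format[i])
--             i += 1
--     return ''.join(out)
-- ===== Notes on version B (the rewrite author's own statement) =====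
-- stated objective: alternative
-- what changed: A rescans the whole string eight times, one full .replace pass per mapping entry; B makes a single left-to-right scan that rewrites each two-character percent token via the mapping as it is met (safe because no replacement contains a percent sign).
import Mathlib
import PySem

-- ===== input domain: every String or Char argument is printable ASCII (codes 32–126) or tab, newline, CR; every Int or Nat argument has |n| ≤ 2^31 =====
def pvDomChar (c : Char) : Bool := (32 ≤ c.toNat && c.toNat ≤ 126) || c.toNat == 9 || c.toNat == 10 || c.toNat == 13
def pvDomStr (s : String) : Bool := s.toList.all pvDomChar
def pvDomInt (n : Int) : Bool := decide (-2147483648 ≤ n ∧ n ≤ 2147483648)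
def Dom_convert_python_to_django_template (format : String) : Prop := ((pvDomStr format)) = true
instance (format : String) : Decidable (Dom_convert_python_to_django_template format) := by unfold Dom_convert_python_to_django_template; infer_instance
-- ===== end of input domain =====

-- B replaces A's eight sequential full-string .replace passes with a single left-to-right
-- scan that rewrites each '%X' token as it is met (objective: alternative single-pass traversal).

-- ===== PORT A =====
-- the dict of A, iterated in insertion order (items as an association list)
def pvMappingA : List (String × String) :=
  [("%d", "d"), ("%m", "m"), ("%y", "y"), ("%Y", "Y"),
   ("%H", "H"), ("%M", "i"), ("%S", "s"), ("%p", "A")]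

def convert_python_to_django_template (format : String) : String :=
  pvMappingA.foldl (fun f p => PySem.Str.replace f p.1 p.2) format

-- ===== PORT B =====
-- B's dict: keyed by the char after '%'; the lookup ported as a small decision chain
def pvMapB (c : Char) : Option Char :=
  if c = 'd' then some 'd' else if c = 'm' then some 'm'
  else if c = 'y' then some 'y' else if c = 'Y' then some 'Y'
  else if c = 'H' then some 'H' else if c = 'M' then some 'i'
  else if c = 'S' then some 's' else if c = 'p' then some 'A'
  else none

-- B's while loop over indices, as the equivalent left-to-right scan of the char list
def pvScanB : List Char → List Char
  | [] => []
  | '%' :: c :: rest =>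
      match pvMapB c with
      | some r => r :: pvScanB rest
      | none => '%' :: pvScanB (c :: rest)
  | c :: rest => c :: pvScanB rest

def convert_python_to_django_template_alt (format : String) : String :=
  String.ofList (pvScanB format.toList)

-- ===== PRECONDITION & SPEC =====
def Spec_convert_python_to_django_template (format : String) (out : String) : Prop := out = convert_python_to_django_template_alt format
instance (format : String) (out : String) : Decidable (Spec_convert_python_to_django_template format out) := by unfold Spec_convert_python_to_django_template; infer_instance

-- ===== CLAIM (what is proved, stated in full; the proofs are below) =====
def Claim_equal_convert_python_to_django_template : Prop := ∀ (format : String), Dom_convert_python_to_django_template format → Spec_convert_python_to_django_template format (convert_python_to_django_template format)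

-- ===== LEMMAS AND PROOFS =====

-- simple recursive characterisation of one .replace pass with pattern ['%', x], replacement [r]
def repl2 (x r : Char) : List Char → List Char
  | [] => []
  | [a] => [a]
  | a :: b :: t => if a = '%' ∧ b = x then r :: repl2 x r t else a :: repl2 x r (b :: t)

theorem repl2_go (x r : Char) :
    ∀ (fuel : Nat) (l acc : List Char), l.length ≤ fuel →
      PySem.Chars.replace.go ['%', x] [r] fuel l acc = acc.reverse ++ repl2 x r l := by
  intro fuel
  induction fuel with
  | zero =>
    intro l acc h
    have : l = [] := List.length_eq_zero_iff.mp (Nat.le_zero.mp h)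
    subst this
    simp [PySem.Chars.replace.go, repl2]
  | succ n ih =>
    intro l acc h
    match l with
    | [] => simp [PySem.Chars.replace.go, repl2]
    | a :: t =>
      rw [PySem.Chars.replace.go]
      by_cases hp : List.isPrefixOf ['%', x] (a :: t)
      · match t, hp with
        | b :: t2, hp =>
          have hab : a = '%' ∧ b = x := by
            simp [List.isPrefixOf] at hp; exact ⟨hp.1.symm, hp.2.symm⟩
          obtain ⟨ha, hb⟩ := hab; subst ha; subst hb
          simp only [hp, if_pos, List.length_cons, List.drop_succ_cons, List.drop_zero,
            List.length_nil]
          rw [ih t2 ([r].reverse ++ acc) (by simp at h ⊢; omega)]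
          simp [repl2]
        | [], hp => simp [List.isPrefixOf] at hp
      · rw [if_neg hp]
        rw [ih t (a :: acc) (by simp at h ⊢; omega)]
        match t with
        | [] => simp [repl2]
        | b :: t2 =>
          have : ¬ (a = '%' ∧ b = x) := by
            intro ⟨h1, h2⟩; subst h1; subst h2; simp [List.isPrefixOf] at hp
          simp [repl2, this]

theorem replace_eq_repl2 (x r : Char) (l : List Char) :
    PySem.Chars.replace l ['%', x] [r] = repl2 x r l := by
  rw [PySem.Chars.replace]
  simp only [List.isEmpty]
  exact (repl2_go x r l.length l [] le_rfl).trans (by simp)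

theorem repl2_cons_ne (x r c : Char) (l : List Char) (h : c ≠ '%') :
    repl2 x r (c :: l) = c :: repl2 x r l := by
  match l with
  | [] => simp [repl2]
  | b :: t => simp [repl2, h]

theorem repl2_hit (x r : Char) (l : List Char) :
    repl2 x r ('%' :: x :: l) = r :: repl2 x r l := by simp [repl2]

theorem repl2_miss (x r c : Char) (l : List Char) (h : c ≠ x) :
    repl2 x r ('%' :: c :: l) = '%' :: repl2 x r (c :: l) := by simp [repl2, h]

-- every head a replace pass can produce is its replacement char or a head of its input
theorem head_mem (x r : Char) (Z S : List Char) (hS : ∀ b t, Z = b :: t → b ∈ S)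
    (b : Char) (t : List Char) (h : repl2 x r Z = b :: t) : b ∈ r :: S := by
  match Z, h with
  | [], h => simp [repl2] at h
  | [a], h =>
    simp [repl2] at h
    exact List.mem_cons_of_mem _ (h.1 ▸ hS a [] rfl)
  | a1 :: a2 :: t2, h =>
    rw [repl2] at h
    split_ifs at h with hc
    · injection h with h1 h2
      exact h1 ▸ List.mem_cons_self
    · injection h with h1 h2
      exact List.mem_cons_of_mem _ (h1 ▸ hS a1 _ rfl)

-- a '%' survives a replace pass whose key cannot follow it
theorem step' (x r : Char) (S : List Char) (hx : x ∉ S) (Z : List Char)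
    (hS : ∀ b t, Z = b :: t → b ∈ S) : repl2 x r ('%' :: Z) = '%' :: repl2 x r Z := by
  match Z with
  | [] => simp [repl2]
  | b :: t =>
    have hb : b ∈ S := hS b t rfl
    have : b ≠ x := fun he => hx (he ▸ hb)
    rw [repl2_miss _ _ _ _ this]

theorem scanB_ne (c : Char) (rest : List Char) (h : c ≠ '%') :
    pvScanB (c :: rest) = c :: pvScanB rest := by
  rw [pvScanB.eq_def]
  match c, rest with
  | c, [] => simp
  | c, b :: t => simp [h]

-- A's eight passes in their dict order compute exactly B's single scan
theorem main_scan (l : List Char) :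
    repl2 'p' 'A' (repl2 'S' 's' (repl2 'M' 'i' (repl2 'H' 'H' (repl2 'Y' 'Y'
      (repl2 'y' 'y' (repl2 'm' 'm' (repl2 'd' 'd' l))))))) = pvScanB l := by
  induction l using pvScanB.induct with
  | case1 => simp [repl2, pvScanB]
  | case2 c rest r hm ih =>
    rw [show pvScanB ('%' :: c :: rest) = r :: pvScanB rest by rw [pvScanB, hm], ← ih]
    unfold pvMapB at hm
    split_ifs at hm with h1 h2 h3 h4 h5 h6 h7 h8 <;>
      (injection hm with hr; subst hr; subst_vars
       simp only [repl2_hit, repl2_miss, repl2_cons_ne, ne_eq, Char.reduceEq,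
         not_false_eq_true])
  | case3 c rest hm ih =>
    rw [show pvScanB ('%' :: c :: rest) = '%' :: pvScanB (c :: rest) by rw [pvScanB, hm], ← ih]
    have hk : ∀ x : Char, pvMapB x ≠ none → c ≠ x := by
      intro x hx he; subst he; rw [hm] at hx; exact hx rfl
    have h0 : ∀ b t, (c :: rest) = b :: t → b ∈ [c] := by
      intro b t he; cases he; exact List.mem_cons_self
    have h1 := head_mem 'd' 'd' _ _ h0
    have h2 := head_mem 'm' 'm' _ _ h1
    have h3 := head_mem 'y' 'y' _ _ h2
    have h4 := head_mem 'Y' 'Y' _ _ h3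
    have h5 := head_mem 'H' 'H' _ _ h4
    have h6 := head_mem 'M' 'i' _ _ h5
    have h7 := head_mem 'S' 's' _ _ h6
    rw [step' 'd' 'd' _ (by simp; exact fun h => hk 'd' (by decide) h.symm) _ h0,
        step' 'm' 'm' _ (by simp; exact fun h => hk 'm' (by decide) h.symm) _ h1,
        step' 'y' 'y' _ (by simp; exact fun h => hk 'y' (by decide) h.symm) _ h2,
        step' 'Y' 'Y' _ (by simp; exact fun h => hk 'Y' (by decide) h.symm) _ h3,
        step' 'H' 'H' _ (by simp; exact fun h => hk 'H' (by decide) h.symm) _ h4,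
        step' 'M' 'i' _ (by simp; exact fun h => hk 'M' (by decide) h.symm) _ h5,
        step' 'S' 's' _ (by simp; exact fun h => hk 'S' (by decide) h.symm) _ h6,
        step' 'p' 'A' _ (by simp; exact fun h => hk 'p' (by decide) h.symm) _ h7]
  | case4 c rest h ih =>
    by_cases hc : c = '%'
    · subst hc
      match rest, h with
      | [], _ => simp [repl2, pvScanB]
      | x :: xs, h => exact (h x xs rfl rfl).elim
    · rw [scanB_ne c rest hc, ← ih]
      simp only [repl2_cons_ne, ne_eq, hc, not_false_eq_true]

-- ===== VERDICT (by name: the statement is the Claim_ definition above) =====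
theorem convert_python_to_django_template_spec : Claim_equal_convert_python_to_django_template := by
  intro format _
  unfold Spec_convert_python_to_django_template convert_python_to_django_template
    convert_python_to_django_template_alt
  apply String.ext
  simp [pvMappingA, List.foldl, PySem.Str.toList_replace, replace_eq_repl2, main_scan,
    String.toList_ofList]
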